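-- pv_equiv track=rewrite | github.com/DickKemp/aoc2022 | 05/p1.py | read_blocks_and_instructions_input
-- ===== SOURCE A (Python) =====
-- def read_blocks_and_instructions_input(inp):
--     # input has two sections
--     # first section is the configuration of boxes
--     # second section is instuctions to move boxes
--     # sections are separated by a blank line
--     block_lines = []
--     instr_lines = []
--     in_blocks = True
--     for line in inp:
--         # e = parse_line(line)
--         e = line
--         if e == '\n':
--             in_blocks = False
--             continue
--         if in_blocks:
--             block_lines.append(e)
--         else:
--             instr_lines.append(e)
--     return (block_lines, instr_lines)
-- ===== SOURCE B (Python) =====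
-- def _sections(inp):
--     # split the line list on every '\n' delimiter, keeping empty sections
--     parts = []
--     cur = []
--     for line in inp:
--         if line == '\n':
--             parts.append(cur)
--             cur = []
--         else:
--             cur.append(line)
--     parts.append(cur)
--     return parts
--
-- def read_blocks_and_instructions_input(inp):
--     parts = _sections(inp)
--     return (parts[0], [l for p in parts[1:] for l in p])
-- ===== Notes on version B (the rewrite author's own statement) =====
-- stated objective: alternative
-- what changed: Instead of A's flag-driven loop interleaving two output lists, B splits the input into a list of sections at every blank line and then recombines: the first section is the blocks, the flattened remaining sections are the instructions.
import Mathlib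
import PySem

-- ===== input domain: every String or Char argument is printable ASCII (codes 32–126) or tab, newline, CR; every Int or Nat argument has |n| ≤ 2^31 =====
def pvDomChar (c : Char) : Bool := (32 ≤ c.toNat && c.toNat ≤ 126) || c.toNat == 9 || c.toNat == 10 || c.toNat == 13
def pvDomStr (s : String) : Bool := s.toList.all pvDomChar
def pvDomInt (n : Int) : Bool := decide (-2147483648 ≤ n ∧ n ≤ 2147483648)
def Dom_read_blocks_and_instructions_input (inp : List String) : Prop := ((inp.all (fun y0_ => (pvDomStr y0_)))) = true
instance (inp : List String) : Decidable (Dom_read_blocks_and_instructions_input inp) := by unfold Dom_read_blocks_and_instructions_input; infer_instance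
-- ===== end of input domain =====

-- B: splits the input into a list of sections at every blank line, then recombines (first section = blocks, flattened rest = instructions), instead of A's flag-driven loop; alternative decomposition, same cost.


-- ===== PORT A =====
-- A's flag-driven loop: state (block_lines, instr_lines, in_blocks)
def pvLoopA : List String → List String → List String → Bool → List String × List String
  | [], bl, il, _ => (bl, il)
  | e :: rest, bl, il, inb =>
      if e = "\n" then pvLoopA rest bl il false
      else if inb then pvLoopA rest (bl ++ [e]) il inb
      else pvLoopA rest bl (il ++ [e]) inb

def read_blocks_and_instructions_input (inp : List String) : List String × List String :=
  pvLoopA inp [] [] true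

-- ===== PORT B =====
-- Source B's _sections: split the line list on every '\n' delimiter, keeping empty sections
def pvSecStep (acc : List (List String) × List String) (line : String) : List (List String) × List String :=
  if line = "\n" then (acc.1 ++ [acc.2], []) else (acc.1, acc.2 ++ [line])

def pvSections (inp : List String) : List (List String) :=
  let st := inp.foldl pvSecStep ([], [])
  st.1 ++ [st.2]

def read_blocks_and_instructions_input_alt (inp : List String) : List String × List String :=
  let parts := pvSections inp
  (parts.headD [], (parts.drop 1).flatten)

-- ===== PRECONDITION & SPEC =====
def Spec_read_blocks_and_instructions_input (inp : List String) (out : List String × List String) : Prop := out = read_blocks_and_instructions_input_alt inp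
instance (inp : List String) (out : List String × List String) : Decidable (Spec_read_blocks_and_instructions_input inp out) := by unfold Spec_read_blocks_and_instructions_input; infer_instance

-- ===== CLAIM =====
def Claim_equal_read_blocks_and_instructions_input : Prop := ∀ (inp : List String), Dom_read_blocks_and_instructions_input inp → Spec_read_blocks_and_instructions_input inp (read_blocks_and_instructions_input inp)

-- ===== LEMMAS AND PROOFS =====
-- closed-form for A's loop once the flag has dropped
theorem pvLoopA_false (inp : List String) : ∀ (bl il : List String),
    pvLoopA inp bl il false = (bl, il ++ inp.filter (fun l => l ≠ "\n")) := by
  induction inp with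
  | nil => intro bl il; simp [pvLoopA]
  | cons e rest ih =>
      intro bl il
      by_cases h : e = "\n" <;> simp [pvLoopA, h, ih]

-- closed-form for A's loop with the flag still set
theorem pvLoopA_true (inp : List String) : ∀ (bl il : List String),
    pvLoopA inp bl il true =
      (bl ++ inp.takeWhile (fun l => l ≠ "\n"),
       il ++ ((inp.dropWhile (fun l => l ≠ "\n")).drop 1).filter (fun l => l ≠ "\n")) := by
  induction inp with
  | nil => intro bl il; simp [pvLoopA]
  | cons e rest ih =>
      intro bl il
      by_cases h : e = "\n"
      · simp [pvLoopA, h, pvLoopA_false]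
      · simp [pvLoopA, h, ih]

-- recursive reformulation of the section-splitting fold (state = current section)
def pvSecAcc (cur : List String) : List String → List (List String) × List String
  | [] => ([], cur)
  | x :: t =>
      if x = "\n" then
        let r := pvSecAcc [] t
        (cur :: r.1, r.2)
      else pvSecAcc (cur ++ [x]) t

theorem pvSections_foldl (inp : List String) : ∀ (parts : List (List String)) (cur : List String),
    inp.foldl pvSecStep (parts, cur) =
      (parts ++ (pvSecAcc cur inp).1, (pvSecAcc cur inp).2) := by
  induction inp with
  | nil => intro parts cur; simp [pvSecAcc]
  | cons x t ih =>
      intro parts cur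
      by_cases h : x = "\n"
      · simp [pvSecStep, pvSecAcc, h, ih]
      · simp [pvSecStep, pvSecAcc, h, ih]

def pvAllParts (cur inp : List String) : List (List String) :=
  (pvSecAcc cur inp).1 ++ [(pvSecAcc cur inp).2]

-- flattening all sections recovers the non-blank lines
theorem pvAllParts_flatten (inp : List String) : ∀ (cur : List String),
    (pvAllParts cur inp).flatten = cur ++ inp.filter (fun l => l ≠ "\n") := by
  induction inp with
  | nil => intro cur; simp [pvAllParts, pvSecAcc]
  | cons x t ih =>
      intro cur
      by_cases h : x = "\n"
      · simp [pvAllParts, pvSecAcc, h] at ih ⊢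
        simp [ih]
      · simp [pvAllParts, pvSecAcc, h] at ih ⊢
        simp [ih]

-- head and tail of the section list in closed form
theorem pvAllParts_head_tail (inp : List String) : ∀ (cur : List String),
    (pvAllParts cur inp).headD [] = cur ++ inp.takeWhile (fun l => l ≠ "\n") ∧
    ((pvAllParts cur inp).drop 1).flatten =
      ((inp.dropWhile (fun l => l ≠ "\n")).drop 1).filter (fun l => l ≠ "\n") := by
  induction inp with
  | nil => intro cur; simp [pvAllParts, pvSecAcc]
  | cons x t ih =>
      intro cur
      by_cases h : x = "\n"
      · constructor
        · simp [pvAllParts, pvSecAcc, h]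
        · have hf := pvAllParts_flatten t []
          simp [pvAllParts, pvSecAcc, h] at hf ⊢
          simpa using hf
      · have := ih (cur ++ [x])
        constructor
        · simpa [pvAllParts, pvSecAcc, h] using this.1
        · simpa [pvAllParts, pvSecAcc, h] using this.2

-- ===== VERDICT =====
theorem read_blocks_and_instructions_input_spec : Claim_equal_read_blocks_and_instructions_input := by
  intro inp _
  show _ = _
  have hp : pvSections inp = pvAllParts [] inp := by
    simp [pvSections, pvAllParts, pvSections_foldl]
  have h := pvAllParts_head_tail inp []
  simp at h
  simp [read_blocks_and_instructions_input, read_blocks_and_instructions_input_alt,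
        pvLoopA_true, hp]
  exact ⟨h.1.symm, h.2.symm⟩
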